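-- pv_equiv track=rewrite | github.com/faga-1/Medical-Policy-Extraction-Algorithm | Code.py | parse_clinical_indications
-- ===== SOURCE A (Python) =====
-- def parse_clinical_indications(clinical_indications):
--     # Split the clinical indications by criteria numbers
--     parsed_data = []
--     lines = clinical_indications.split('\n')
--     current_section = []
--     for line in lines:
--         if line.strip().isdigit() or line.strip().split()[0].isdigit():
--             if current_section:
--                 parsed_data.append(' '.join(current_section).strip())
--             current_section = [line]
--         else:
--             current_section.append(line)
--     if current_section:
--         parsed_data.append(' '.join(current_section).strip())
--     return parsed_data
-- ===== SOURCE B (Python) =====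
-- def parse_clinical_indications(clinical_indications):
--     # Recursive span-based grouping: cut the line list into sections, then join each.
--     def is_start(line):
--         s = line.strip()
--         return s.isdigit() or s.split()[0].isdigit()
--
--     def sections(ls):
--         if not ls:
--             return []
--         rest = ls[1:]
--         body = []
--         while rest and not is_start(rest[0]):
--             body.append(rest[0])
--             rest = rest[1:]
--         return [[ls[0]] + body] + sections(rest)
--
--     return [' '.join(sec).strip()
--             for sec in sections(clinical_indications.split('\n'))]
-- ===== Notes on version B (the rewrite author's own statement) =====
-- stated objective: alternative
-- what changed: A threads one left fold with two mutable accumulators (emitted sections + current section) and a trailing flush; B first cuts the line list into sections by recursive span-based grouping (each section = its first line plus the following non-start lines) and then maps join-and-strip over the sections.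
import Mathlib
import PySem

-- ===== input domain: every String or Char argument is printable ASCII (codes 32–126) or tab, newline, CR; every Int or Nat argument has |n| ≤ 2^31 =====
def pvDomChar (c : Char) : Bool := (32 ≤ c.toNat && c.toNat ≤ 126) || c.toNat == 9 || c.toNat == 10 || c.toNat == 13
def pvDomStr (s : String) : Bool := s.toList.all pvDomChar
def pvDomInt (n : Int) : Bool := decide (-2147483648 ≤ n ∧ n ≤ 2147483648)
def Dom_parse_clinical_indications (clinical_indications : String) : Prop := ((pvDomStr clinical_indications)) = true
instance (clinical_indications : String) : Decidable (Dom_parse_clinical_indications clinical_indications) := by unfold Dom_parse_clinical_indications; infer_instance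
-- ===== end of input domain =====

-- B replaces A's single left fold with two accumulators by a recursive span-based
-- grouping into sections followed by a map (objective: alternative decomposition, same cost).

-- shared helper: the per-line section-start test
-- `line.strip().isdigit() or line.strip().split()[0].isdigit()`
-- (the `[0]` raises IndexError in Python when the stripped line is empty;
--  here it yields `none`, read as false — exactly those inputs are excluded by Pre_)
def pvIsStart (line : String) : Bool :=
  PySem.Str.strIsdigit (PySem.Str.strip line) ||
    (match PySem.List.pyGet? (PySem.Str.split₀ (PySem.Str.strip line)) 0 with
     | some w => PySem.Str.strIsdigit w
     | none => false)

-- ===== PORT A =====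
def parse_clinical_indications (clinical_indications : String) : List String :=
  let lines := (PySem.Str.split? clinical_indications "\n").getD []
  let st := lines.foldl
    (fun (st : List String × List String) line =>
      if pvIsStart line then
        ((if st.2.isEmpty then st.1
          else st.1 ++ [PySem.Str.strip (PySem.Str.join " " st.2)]), [line])
      else (st.1, st.2 ++ [line]))
    ([], [])
  if st.2.isEmpty then st.1 else st.1 ++ [PySem.Str.strip (PySem.Str.join " " st.2)]

-- ===== PORT B =====
-- cut the line list into sections: each section takes its first line unconditionally,
-- then every following line up to (not including) the next section start
def pvSections : List String → List (List String)
  | [] => []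
  | l :: ls =>
    (l :: ls.takeWhile (fun x => !pvIsStart x)) ::
      pvSections (ls.dropWhile (fun x => !pvIsStart x))
termination_by ls => ls.length
decreasing_by simpa using Nat.lt_succ_of_le (List.length_dropWhile_le _ _)

def parse_clinical_indications_alt (clinical_indications : String) : List String :=
  (pvSections ((PySem.Str.split? clinical_indications "\n").getD [])).map
    (fun sec => PySem.Str.strip (PySem.Str.join " " sec))

-- ===== PRECONDITION & SPEC =====
-- Pre_ excludes inputs containing a whitespace-only line (incl. the empty input), on which
-- Python A raises IndexError at `line.strip().split()[0]`.
def Pre_parse_clinical_indications (clinical_indications : String) : Prop :=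
  ∀ l ∈ (PySem.Str.split? clinical_indications "\n").getD [], PySem.Str.strip l ≠ ""
instance (clinical_indications : String) : Decidable (Pre_parse_clinical_indications clinical_indications) := by unfold Pre_parse_clinical_indications; infer_instance

def pvWitness_parse_clinical_indications : String := "1. Criteria\nmust hold\n2 other"

def Spec_parse_clinical_indications (clinical_indications : String) (out : List String) : Prop := out = parse_clinical_indications_alt clinical_indications
instance (clinical_indications : String) (out : List String) : Decidable (Spec_parse_clinical_indications clinical_indications out) := by unfold Spec_parse_clinical_indications; infer_instance

-- ===== CLAIM (what is proved, stated in full; the proofs are below) =====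
def Claim_equal_parse_clinical_indications : Prop := ∀ (clinical_indications : String), Dom_parse_clinical_indications clinical_indications → Pre_parse_clinical_indications clinical_indications → Spec_parse_clinical_indications clinical_indications (parse_clinical_indications clinical_indications)

-- ===== LEMMAS AND PROOFS =====

-- A's in-progress section, continued over the remaining lines (proof-only helper)
def pvSecFrom (cur : List String) : List String → List (List String)
  | [] => [cur]
  | l :: ls => if pvIsStart l then cur :: pvSecFrom [l] ls else pvSecFrom (cur ++ [l]) ls

def pvEmit (cur : List String) : String := PySem.Str.strip (PySem.Str.join " " cur)

theorem pvSecFrom_eq_sections (ls : List String) : ∀ cur,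
    pvSecFrom cur ls =
      (cur ++ ls.takeWhile (fun x => !pvIsStart x)) ::
        pvSections (ls.dropWhile (fun x => !pvIsStart x)) := by
  induction ls with
  | nil => intro cur; simp [pvSecFrom, pvSections]
  | cons l ls ih =>
    intro cur
    by_cases h : pvIsStart l
    · simp [pvSecFrom, h, pvSections, ih [l]]
    · simp [pvSecFrom, h, ih (cur ++ [l])]

theorem pvFold_eq_secFrom (ls : List String) : ∀ (parsed cur : List String), cur ≠ [] →
    (let st := ls.foldl
      (fun (st : List String × List String) line =>
        if pvIsStart line then
          ((if st.2.isEmpty then st.1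
            else st.1 ++ [PySem.Str.strip (PySem.Str.join " " st.2)]), [line])
        else (st.1, st.2 ++ [line]))
      (parsed, cur)
     if st.2.isEmpty then st.1 else st.1 ++ [PySem.Str.strip (PySem.Str.join " " st.2)])
    = parsed ++ (pvSecFrom cur ls).map pvEmit := by
  induction ls with
  | nil =>
    intro parsed cur hcur
    simp [pvSecFrom, pvEmit, hcur]
  | cons l ls ih =>
    intro parsed cur hcur
    have hne : cur.isEmpty = false := by simp [hcur]
    by_cases h : pvIsStart l
    · have h1 := ih (parsed ++ [PySem.Str.strip (PySem.Str.join " " cur)]) [l] (by simp)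
      simp only [List.foldl_cons, h, if_true, hne, Bool.false_eq_true, if_false] at h1 ⊢
      rw [h1]
      simp [pvSecFrom, h, pvEmit]
    · have h1 := ih parsed (cur ++ [l]) (by simp)
      simp only [List.foldl_cons, h, Bool.false_eq_true, if_false] at h1 ⊢
      rw [h1]
      simp [pvSecFrom, h]

-- ===== VERDICT (by name: the statement is the Claim_ definition above) =====
theorem parse_clinical_indications_spec : Claim_equal_parse_clinical_indications := by
  intro s _ _
  unfold Spec_parse_clinical_indications parse_clinical_indications parse_clinical_indications_alt
  cases hls : (PySem.Str.split? s "\n").getD [] with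
  | nil => simp [pvSections]
  | cons l ls =>
    have hstep :
        (fun (st : List String × List String) line =>
          if pvIsStart line then
            ((if st.2.isEmpty then st.1
              else st.1 ++ [PySem.Str.strip (PySem.Str.join " " st.2)]), [line])
          else (st.1, st.2 ++ [line])) ([], []) l = (([] : List String), [l]) := by
      by_cases h : pvIsStart l <;> simp [h]
    simp only [List.foldl_cons, hstep]
    have := pvFold_eq_secFrom ls [] [l] (by simp)
    simp only [this, List.nil_append, pvSecFrom_eq_sections ls [l], pvSections]
    simp [pvEmit]
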